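-- pv_equiv track=rewrite | github.com/afrazrajpoot/health_care_backend | helpers/short_summary_generator.py | deduplicate_fields
-- ===== SOURCE A (Python) =====
-- def deduplicate_fields(structured_summary: dict) -> dict:
--     """
--     Ensure each field type appears only once.
--     """
--     if "summary" not in structured_summary or "items" not in structured_summary["summary"]:
--         return structured_summary
--
--     items = structured_summary["summary"]["items"]
--     field_map = {}
--
--     for item in items:
--         field = item.get("field", "")
--         if not field:
--             continue
--
--         if field not in field_map:
--             field_map[field] = item
--         else:
--             # Merge expanded content
--             existing = field_map[field]
--             new_expanded = item.get("expanded", "")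
--             if new_expanded:
--                 if existing.get("expanded"):
--                     # Add new bullets if not already present
--                     existing_bullets = set(existing["expanded"].split('\n'))
--                     new_bullets = set(new_expanded.split('\n'))
--                     combined = existing_bullets.union(new_bullets)
--                     existing["expanded"] = '\n'.join(sorted(combined))
--                 else:
--                     existing["expanded"] = new_expanded
--
--     structured_summary["summary"]["items"] = list(field_map.values())
--     return structured_summary
-- ===== SOURCE B (Python) =====
-- def _merge_group(group):
--     """Fold all later items of a field group into its first item (in place)."""
--     rep = group[0]
--     for item in group[1:]:
--         new_expanded = item.get("expanded", "")
--         if new_expanded: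
--             if rep.get("expanded"):
--                 rep["expanded"] = "\n".join(
--                     sorted(set(rep["expanded"].split("\n")) | set(new_expanded.split("\n")))
--                 )
--             else:
--                 rep["expanded"] = new_expanded
--     return rep
--
--
-- def deduplicate_fields(structured_summary: dict) -> dict:
--     """
--     Ensure each field type appears only once.
--     Two-pass: group items by field (first-seen order), then merge each group.
--     """
--     if "summary" not in structured_summary or "items" not in structured_summary["summary"]:
--         return structured_summary
--
--     groups = {}
--     for item in structured_summary["summary"]["items"]:
--         field = item.get("field", "")
--         if field:
--             groups.setdefault(field, []).append(item)
--
--     structured_summary["summary"]["items"] = [_merge_group(g) for g in groups.values()]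
--     return structured_summary
-- ===== Notes on version B (the rewrite author's own statement) =====
-- stated objective: alternative
-- what changed: B replaces A's single pass that merges each item on the fly into a dict of representatives by a two-pass decomposition: one pass grouping items into an ordered dict field -> list of items, then a per-group fold of the later items into the group's first item.
import Mathlib
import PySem

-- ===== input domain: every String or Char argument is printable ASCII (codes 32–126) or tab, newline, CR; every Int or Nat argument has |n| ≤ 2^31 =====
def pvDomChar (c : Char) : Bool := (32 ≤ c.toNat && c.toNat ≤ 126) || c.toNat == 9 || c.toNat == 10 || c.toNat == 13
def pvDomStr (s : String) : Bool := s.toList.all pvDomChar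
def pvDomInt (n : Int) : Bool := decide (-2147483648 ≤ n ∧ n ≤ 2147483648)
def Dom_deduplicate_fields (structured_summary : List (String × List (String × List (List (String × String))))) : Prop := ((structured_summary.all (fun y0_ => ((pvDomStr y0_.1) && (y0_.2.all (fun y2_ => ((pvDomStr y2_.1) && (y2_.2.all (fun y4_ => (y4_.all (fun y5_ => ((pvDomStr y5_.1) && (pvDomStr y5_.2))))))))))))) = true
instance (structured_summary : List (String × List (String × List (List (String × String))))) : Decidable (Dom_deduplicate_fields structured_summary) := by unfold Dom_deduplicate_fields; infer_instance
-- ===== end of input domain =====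

-- B groups items by field first and then folds each group into its first item, instead of A's
-- single pass merging into a dict of representatives; same return value (both Pythons also mutate
-- the argument and the first item of each field group in place, in the same way).

-- '\n'.join(sorted(set(a.split('\n')) | set(b.split('\n'))))  (identical expression in both
-- Pythons; sep "\n" is a nonempty literal, so split? is always `some` and `.getD []` is exact)
def pvMergeExpanded (a b : String) : String :=
  PySem.Str.join "\n"
    (PySem.List.sorted
      (PySem.Set.union (PySem.Set.ofList ((PySem.Str.split? a "\n").getD []))
        (PySem.Set.ofList ((PySem.Str.split? b "\n").getD [])))
      (fun s => s) false)

-- ===== PORT A =====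
-- the body of A's 'for item in items' loop over the accumulator field_map
-- (field_map[field] is guarded by the containment test, so `.getD … []` is exact)
def dedupA_step (fm : PySem.Dict String (List (String × String))) (item : List (String × String)) :
    PySem.Dict String (List (String × String)) :=
  let field := (PySem.Dict.mk item).getD "field" ""
  if field = "" then fm
  else if fm.contains field = false then fm.insert field item
  else
    let existing := fm.getD field []
    let newExpanded := (PySem.Dict.mk item).getD "expanded" ""
    if newExpanded = "" then fm
    else if (PySem.Dict.mk existing).getD "expanded" "" ≠ "" then
      fm.insert field
        ((PySem.Dict.mk existing).insert "expanded"
          (pvMergeExpanded ((PySem.Dict.mk existing).getD "expanded" "") newExpanded)).items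
    else
      fm.insert field ((PySem.Dict.mk existing).insert "expanded" newExpanded).items

def deduplicate_fields (structured_summary : List (String × List (String × List (List (String × String))))) : List (String × List (String × List (List (String × String)))) :=
  if (PySem.Dict.mk structured_summary).contains "summary" = false
      ∨ (PySem.Dict.mk ((PySem.Dict.mk structured_summary).getD "summary" [])).contains "items" = false
  then structured_summary
  else
    ((PySem.Dict.mk structured_summary).insert "summary"
      ((PySem.Dict.mk ((PySem.Dict.mk structured_summary).getD "summary" [])).insert "items"
        ((((PySem.Dict.mk ((PySem.Dict.mk structured_summary).getD "summary" [])).getD "items" []).foldl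
            dedupA_step PySem.Dict.empty).values)).items).items

-- ===== PORT B =====
-- Source B: merging one later item of a group into the representative (body of _merge_group's loop)
def dedupB_merge (rep item : List (String × String)) : List (String × String) :=
  let newExpanded := (PySem.Dict.mk item).getD "expanded" ""
  if newExpanded = "" then rep
  else if (PySem.Dict.mk rep).getD "expanded" "" ≠ "" then
    ((PySem.Dict.mk rep).insert "expanded"
      (pvMergeExpanded ((PySem.Dict.mk rep).getD "expanded" "") newExpanded)).items
  else ((PySem.Dict.mk rep).insert "expanded" newExpanded).items

-- Source B: _merge_group(group): rep = group[0]; fold group[1:] into it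
-- (the [] case is unreachable: every group built by the grouping loop is nonempty)
def dedupB_fold (group : List (List (String × String))) : List (String × String) :=
  match group with
  | [] => []
  | rep :: rest => rest.foldl dedupB_merge rep

-- Source B: the grouping loop body, groups.setdefault(field, []).append(item)
def dedupB_group (g : PySem.Dict String (List (List (String × String)))) (item : List (String × String)) :
    PySem.Dict String (List (List (String × String))) :=
  let field := (PySem.Dict.mk item).getD "field" ""
  if field = "" then g else g.modify field [] (fun grp => grp ++ [item])

def deduplicate_fields_alt (structured_summary : List (String × List (String × List (List (String × String))))) : List (String × List (String × List (List (String × String)))) :=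
  if (PySem.Dict.mk structured_summary).contains "summary" = false
      ∨ (PySem.Dict.mk ((PySem.Dict.mk structured_summary).getD "summary" [])).contains "items" = false
  then structured_summary
  else
    ((PySem.Dict.mk structured_summary).insert "summary"
      ((PySem.Dict.mk ((PySem.Dict.mk structured_summary).getD "summary" [])).insert "items"
        (((((PySem.Dict.mk ((PySem.Dict.mk structured_summary).getD "summary" [])).getD "items" []).foldl
            dedupB_group PySem.Dict.empty).values).map dedupB_fold)).items).items

-- ===== PRECONDITION & SPEC =====
def Spec_deduplicate_fields (structured_summary : List (String × List (String × List (List (String × String))))) (out : List (String × List (String × List (List (String × String))))) : Prop := out = deduplicate_fields_alt structured_summary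
-- explicit DecidableEq term (automatic synthesis exceeds the default instance-search limits here)
def pvDecEqOut : DecidableEq (List (String × List (String × List (List (String × String))))) :=
  @instDecidableEqList _ (@instDecidableEqProd _ _ instDecidableEqString
    (@instDecidableEqList _ (@instDecidableEqProd _ _ instDecidableEqString
      (@instDecidableEqList _ (@instDecidableEqList _
        (@instDecidableEqProd _ _ instDecidableEqString instDecidableEqString))))))
instance (structured_summary : List (String × List (String × List (List (String × String))))) (out : List (String × List (String × List (List (String × String))))) : Decidable (Spec_deduplicate_fields structured_summary out) := by unfold Spec_deduplicate_fields; exact pvDecEqOut out (deduplicate_fields_alt structured_summary)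

-- ===== CLAIM (what is proved, stated in full; the proofs are below) =====
def Claim_equal_deduplicate_fields : Prop := ∀ (structured_summary : List (String × List (String × List (List (String × String))))), Dom_deduplicate_fields structured_summary → Spec_deduplicate_fields structured_summary (deduplicate_fields structured_summary)

-- ===== LEMMAS AND PROOFS =====

-- the association list of groups, each group collapsed by dedupB_fold
def pvMv (l : List (String × List (List (String × String)))) : List (String × List (String × String)) :=
  l.map (fun p => (p.1, dedupB_fold p.2))

theorem pv_get?_map_snd {ν ν' : Type} (f : ν → ν') (l : List (String × ν)) (k : String) :
    (PySem.Dict.mk (l.map (fun p => (p.1, f p.2)))).get? k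
      = ((PySem.Dict.mk l).get? k).map f := by
  induction l with
  | nil => rfl
  | cons a t ih =>
    obtain ⟨a1, a2⟩ := a
    simp only [List.map_cons, PySem.Dict.get?_mk_cons]
    by_cases h : (a1 == k) = true
    · rw [if_pos h, if_pos h, Option.map_some]
    · rw [if_neg h, if_neg h, ih]

theorem pv_contains_mv (l : List (String × List (List (String × String)))) (k : String) :
    (PySem.Dict.mk (pvMv l)).contains k = (PySem.Dict.mk l).contains k := by
  rw [PySem.Dict.contains_eq_isSome_get?, PySem.Dict.contains_eq_isSome_get?]
  unfold pvMv
  rw [pv_get?_map_snd]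
  cases (PySem.Dict.mk l).get? k <;> rfl

theorem pv_insert_eq_self_of_get? {ν : Type} (l : List (String × ν)) (k : String) (v : ν)
    (hnd : (l.map Prod.fst).Nodup) (h : (PySem.Dict.mk l).get? k = some v) :
    (PySem.Dict.mk l).insert k v = PySem.Dict.mk l := by
  have hcon : (PySem.Dict.mk l).contains k = true := by
    rw [PySem.Dict.contains_eq_isSome_get?, h]; rfl
  apply PySem.Dict.ext
  unfold PySem.Dict.insert
  rw [if_pos hcon]
  show l.map (fun p => if (p.1 == k) = true then (k, v) else p) = l
  have hpt : ∀ p ∈ l, (fun p => if (p.1 == k) = true then (k, v) else p) p = id p := by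
    intro p hp
    by_cases hpk : (p.1 == k) = true
    · have hk' : p.1 = k := eq_of_beq hpk
      have hmem : (k, p.2) ∈ (PySem.Dict.mk l).items := by
        show (k, p.2) ∈ l
        rw [← hk', Prod.mk.eta]; exact hp
      have hg := PySem.Dict.get?_of_mem_items _ hmem hnd
      rw [h] at hg
      have hv : v = p.2 := Option.some.inj hg
      show (if (p.1 == k) = true then (k, v) else p) = p
      rw [if_pos hpk, hv, ← hk', Prod.mk.eta]
    · show (if (p.1 == k) = true then (k, v) else p) = p
      rw [if_neg hpk]
  rw [List.map_congr_left hpt, List.map_id]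

theorem pv_fold_append (grp : List (List (String × String))) (it : List (String × String))
    (h : grp ≠ []) : dedupB_fold (grp ++ [it]) = dedupB_merge (dedupB_fold grp) it := by
  cases grp with
  | nil => exact absurd rfl h
  | cons a t => simp [dedupB_fold, List.foldl_append]

theorem pv_mv_replace (item : List (String × String)) (field : String)
    (grp : List (List (String × String))) (l : List (String × List (List (String × String))))
    (hne : ∀ p ∈ l, p.2 ≠ []) (hnd : (l.map Prod.fst).Nodup)
    (hget : (PySem.Dict.mk l).get? field = some grp) :
    pvMv (l.map (fun p => if (p.1 == field) = true then (field, grp ++ [item]) else p))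
      = (pvMv l).map (fun p =>
          if (p.1 == field) = true then (field, dedupB_merge (dedupB_fold grp) item) else p) := by
  unfold pvMv
  rw [List.map_map, List.map_map]
  apply List.map_congr_left
  intro p hp
  by_cases hpk : (p.1 == field) = true
  · have hk' : p.1 = field := eq_of_beq hpk
    have hmem : (field, p.2) ∈ (PySem.Dict.mk l).items := by
      show (field, p.2) ∈ l
      rw [← hk', Prod.mk.eta]; exact hp
    have hg := PySem.Dict.get?_of_mem_items _ hmem hnd
    rw [hget] at hg
    have hgrp : grp = p.2 := Option.some.inj hg
    have hpne : p.2 ≠ [] := hne p hp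
    show (fun p => (p.1, dedupB_fold p.2)) (if (p.1 == field) = true then (field, grp ++ [item]) else p)
      = if ((p.1, dedupB_fold p.2).1 == field) = true
          then (field, dedupB_merge (dedupB_fold grp) item) else (p.1, dedupB_fold p.2)
    have hpk2 : ((p.1, dedupB_fold p.2).1 == field) = true := hpk
    rw [if_pos hpk, if_pos hpk2]
    show (field, dedupB_fold (grp ++ [item])) = (field, dedupB_merge (dedupB_fold grp) item)
    rw [hgrp, pv_fold_append p.2 item hpne, ← hgrp]
  · have hpk2 : ¬((p.1, dedupB_fold p.2).1 == field) = true := hpk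
    show (fun p => (p.1, dedupB_fold p.2)) (if (p.1 == field) = true then (field, grp ++ [item]) else p)
      = if ((p.1, dedupB_fold p.2).1 == field) = true
          then (field, dedupB_merge (dedupB_fold grp) item) else (p.1, dedupB_fold p.2)
    rw [if_neg hpk, if_neg hpk2]

-- collapsing B's grouping step at a present key = inserting the merged representative
theorem pv_B_side (item : List (String × String)) (field : String)
    (grp : List (List (String × String))) (l : List (String × List (List (String × String))))
    (hne : ∀ p ∈ l, p.2 ≠ []) (hnd : (l.map Prod.fst).Nodup)
    (h : (PySem.Dict.mk l).get? field = some grp) :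
    PySem.Dict.mk (pvMv (((PySem.Dict.mk l).modify field [] (fun g => g ++ [item])).items))
      = (PySem.Dict.mk (pvMv l)).insert field (dedupB_merge (dedupB_fold grp) item) := by
  have hcl : (PySem.Dict.mk l).contains field = true := by
    rw [PySem.Dict.contains_eq_isSome_get?, h]; rfl
  have hcm : (PySem.Dict.mk (pvMv l)).contains field = true := by
    rw [pv_contains_mv]; exact hcl
  apply PySem.Dict.ext
  unfold PySem.Dict.modify
  rw [PySem.Dict.getD, h, Option.getD_some]
  unfold PySem.Dict.insert
  rw [if_pos hcl, if_pos hcm]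
  exact pv_mv_replace item field grp l hne hnd h

-- one loop iteration: A's step on the collapsed dict = collapse of B's grouping step
theorem pv_step_eq (item : List (String × String))
    (l : List (String × List (List (String × String))))
    (hne : ∀ p ∈ l, p.2 ≠ []) (hnd : (l.map Prod.fst).Nodup) :
    dedupA_step (PySem.Dict.mk (pvMv l)) item
      = PySem.Dict.mk (pvMv ((dedupB_group (PySem.Dict.mk l) item).items)) := by
  unfold dedupA_step dedupB_group
  by_cases hf : (PySem.Dict.mk item).getD "field" "" = ""
  · rw [if_pos hf, if_pos hf]
  · rw [if_neg hf, if_neg hf]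
    by_cases hc : (PySem.Dict.mk l).contains ((PySem.Dict.mk item).getD "field" "") = true
    · -- the field is already present: A merges into field_map, B appends to the group
      rcases ho : (PySem.Dict.mk l).get? ((PySem.Dict.mk item).getD "field" "") with _ | grp
      · rw [PySem.Dict.contains_eq_isSome_get?, ho] at hc; exact absurd hc (by simp)
      have hcm : (PySem.Dict.mk (pvMv l)).contains ((PySem.Dict.mk item).getD "field" "") = true := by
        rw [pv_contains_mv]; exact hc
      have hgetm : (PySem.Dict.mk (pvMv l)).get? ((PySem.Dict.mk item).getD "field" "")
          = some (dedupB_fold grp) := by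
        unfold pvMv; rw [pv_get?_map_snd, ho, Option.map_some]
      have hndm : ((pvMv l).map Prod.fst).Nodup := by
        unfold pvMv; rw [List.map_map]; exact hnd
      rw [if_neg (by rw [hcm]; simp)]
      rw [PySem.Dict.getD, hgetm, Option.getD_some]
      rw [pv_B_side item _ grp l hne hnd ho]
      unfold dedupB_merge
      by_cases hx : (PySem.Dict.mk item).getD "expanded" "" = ""
      · rw [if_pos hx, if_pos hx]
        exact (pv_insert_eq_self_of_get? (pvMv l) _ (dedupB_fold grp) hndm hgetm).symm
      · rw [if_neg hx, if_neg hx]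
        by_cases he : (PySem.Dict.mk (dedupB_fold grp)).getD "expanded" "" ≠ ""
        · rw [if_pos he, if_pos he]
        · rw [if_neg he, if_neg he]
    · -- a fresh field: both sides append a new entry
      have hcf : (PySem.Dict.mk l).contains ((PySem.Dict.mk item).getD "field" "") = false := by
        revert hc; cases (PySem.Dict.mk l).contains ((PySem.Dict.mk item).getD "field" "") <;> simp
      have hcmf : (PySem.Dict.mk (pvMv l)).contains ((PySem.Dict.mk item).getD "field" "") = false := by
        rw [pv_contains_mv]; exact hcf
      rw [if_pos hcmf]
      apply PySem.Dict.ext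
      unfold PySem.Dict.modify
      rw [PySem.Dict.getD_of_not_contains _ _ hcf]
      unfold PySem.Dict.insert
      rw [if_neg (by simp [hcmf]), if_neg (by simp [hcf])]
      show pvMv l ++ [((PySem.Dict.mk item).getD "field" "", item)]
        = pvMv (l ++ [((PySem.Dict.mk item).getD "field" "", [] ++ [item])])
      unfold pvMv
      rw [List.map_append]
      rfl

-- invariants of B's grouping loop
theorem pv_group_inv (item : List (String × String))
    (g : PySem.Dict String (List (List (String × String))))
    (hne : ∀ p ∈ g.items, p.2 ≠ []) (hnd : g.keys.Nodup) :
    (∀ p ∈ (dedupB_group g item).items, p.2 ≠ []) ∧ (dedupB_group g item).keys.Nodup := by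
  unfold dedupB_group
  by_cases hf : (PySem.Dict.mk item).getD "field" "" = ""
  · rw [if_pos hf]; exact ⟨hne, hnd⟩
  · rw [if_neg hf]
    refine ⟨?_, ?_⟩
    · intro p hp
      unfold PySem.Dict.modify at hp
      rcases (PySem.Dict.mem_items_insert _ _ _ _).mp hp with h1 | h2
      · rw [h1]; simp
      · exact hne p h2.1
    · unfold PySem.Dict.modify
      exact PySem.Dict.nodup_keys_insert _ _ _ hnd

-- whole loop: A's fold on the collapsed dict = collapse of B's grouping fold
theorem pv_fold_eq (items : List (List (String × String))) :
    ∀ g : PySem.Dict String (List (List (String × String))),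
      (∀ p ∈ g.items, p.2 ≠ []) → g.keys.Nodup →
      items.foldl dedupA_step (PySem.Dict.mk (pvMv g.items))
        = PySem.Dict.mk (pvMv ((items.foldl dedupB_group g).items)) := by
  induction items with
  | nil => intro g _ _; rfl
  | cons it rest ih =>
    intro g hne hnd
    have hkeys : g.keys = g.items.map Prod.fst := rfl
    rw [List.foldl_cons, List.foldl_cons,
      pv_step_eq it g.items hne (by rw [← hkeys]; exact hnd)]
    obtain ⟨h1, h2⟩ := pv_group_inv it g hne hnd
    exact ih (dedupB_group g it) h1 h2

-- ===== VERDICT (by name: the statement is the Claim_ definition above) =====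
theorem deduplicate_fields_spec : Claim_equal_deduplicate_fields := by
  intro structured_summary _
  unfold Spec_deduplicate_fields deduplicate_fields deduplicate_fields_alt
  by_cases hC : (PySem.Dict.mk structured_summary).contains "summary" = false
      ∨ (PySem.Dict.mk ((PySem.Dict.mk structured_summary).getD "summary" [])).contains "items" = false
  · rw [if_pos hC, if_pos hC]
  · rw [if_neg hC, if_neg hC]
    have h := pv_fold_eq
      ((PySem.Dict.mk ((PySem.Dict.mk structured_summary).getD "summary" [])).getD "items" [])
      PySem.Dict.empty
      (by intro p hp; simp [PySem.Dict.empty] at hp)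
      (by simp [PySem.Dict.keys, PySem.Dict.empty])
    have hempty : PySem.Dict.mk (pvMv (PySem.Dict.empty (κ := String)
        (ν := List (List (String × String)))).items) = PySem.Dict.empty := rfl
    rw [hempty] at h
    have hv : (((PySem.Dict.mk ((PySem.Dict.mk structured_summary).getD "summary" [])).getD "items" []).foldl
          dedupA_step PySem.Dict.empty).values
        = ((((PySem.Dict.mk ((PySem.Dict.mk structured_summary).getD "summary" [])).getD "items" []).foldl
            dedupB_group PySem.Dict.empty).values).map dedupB_fold := by
      rw [h]
      show List.map (fun x => x.2) (pvMv ((((PySem.Dict.mk ((PySem.Dict.mk structured_summary).getD "summary" [])).getD "items" []).foldl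
            dedupB_group PySem.Dict.empty)).items)
        = List.map dedupB_fold (List.map (fun x => x.2) ((((PySem.Dict.mk ((PySem.Dict.mk structured_summary).getD "summary" [])).getD "items" []).foldl
            dedupB_group PySem.Dict.empty)).items)
      unfold pvMv
      rw [List.map_map, List.map_map]
      rfl
    rw [hv]
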